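-- pv_equiv track=rewrite | github.com/khloe1425/luyenthihsgioi | THCS/2022_2023/KhanhHoa_NhaTrang_2223/Bai4/paint.py | calculate_painted_area
-- ===== SOURCE A (Python) =====
-- def calculate_painted_area(m, n, grid):
--     total_area = 0
--
--     # Cộng diện tích mặt trên
--     total_area += m * n
--
--     # Duyệt qua từng ô trong lưới
--     for i in range(m):
--         for j in range(n):
--             # Lấy chiều cao cột tại vị trí (i, j)
--             height = grid[i][j]
--
--             # Mặt trước: So sánh với cột phía trước (i-1)
--             if i == 0:  # Ở rìa trên, luôn sơn mặt trước
--                 total_area += height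
--             else:
--                 total_area += max(0, height - grid[i-1][j])
--
--             # Mặt sau: So sánh với cột phía sau (i+1)
--             if i == m-1:  # Ở rìa dưới, luôn sơn mặt sau
--                 total_area += height
--             else:
--                 total_area += max(0, height - grid[i+1][j])
--
--             # Mặt trái: So sánh với cột bên trái (j-1)
--             if j == 0:  # Ở rìa trái, luôn sơn mặt trái
--                 total_area += height
--             else:
--                 total_area += max(0, height - grid[i][j-1])
--
--             # Mặt phải: So sánh với cột bên phải (j+1)
--             if j == n-1:  # Ở rìa phải, luôn sơn mặt phải
--                 total_area += height
--             else:
--                 total_area += max(0, height - grid[i][j+1])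
--
--     return total_area
-- ===== SOURCE B (Python) =====
-- def calculate_painted_area(m, n, grid):
--     total = m * n
--     if m <= 0 or n <= 0:
--         return total
--     rows = [row[:n] for row in grid[:m]]
--     total += sum(rows[0]) + sum(rows[-1])
--     for row in rows:
--         total += row[0] + row[-1]
--         total += sum(abs(a - b) for a, b in zip(row, row[1:]))
--     for r1, r2 in zip(rows, rows[1:]):
--         total += sum(abs(a - b) for a, b in zip(r1, r2))
--     return total
-- ===== Notes on version B (the rewrite author's own statement) =====
-- stated objective: simpler
-- what changed: Instead of A's per-cell loop testing all four neighbours of every cell with index arithmetic, B adds the top area m*n, the always-painted border faces (first/last entry of each row, sums of first/last rows) and one |difference| term per adjacent pair of cells, using max(0,a-b)+max(0,b-a)=|a-b|, iterating over the rows and zipped adjacent pairs.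
import Mathlib
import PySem

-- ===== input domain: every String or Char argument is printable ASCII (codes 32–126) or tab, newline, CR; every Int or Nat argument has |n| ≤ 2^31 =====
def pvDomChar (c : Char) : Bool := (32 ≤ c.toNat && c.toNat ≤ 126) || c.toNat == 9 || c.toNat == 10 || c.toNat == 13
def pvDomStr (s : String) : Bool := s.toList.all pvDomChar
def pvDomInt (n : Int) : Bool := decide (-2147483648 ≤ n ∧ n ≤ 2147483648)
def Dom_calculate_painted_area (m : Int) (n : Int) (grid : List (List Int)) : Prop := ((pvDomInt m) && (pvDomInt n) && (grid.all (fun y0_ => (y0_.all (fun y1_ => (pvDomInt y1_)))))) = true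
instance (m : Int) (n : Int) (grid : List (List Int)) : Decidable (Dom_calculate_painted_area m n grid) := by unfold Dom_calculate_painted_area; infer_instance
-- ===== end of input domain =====

-- B replaces A's per-cell loop with four boundary comparisons (border faces + |difference| of adjacent
-- cells via max(0,a-b)+max(0,b-a)=|a-b|), iterating over the rows themselves instead of index arithmetic
-- (objective: simpler).

-- ===== PORT A =====
def calculate_painted_area (m : Int) (n : Int) (grid : List (List Int)) : Int :=
  -- total_area = 0; total_area += m * n; nested for-loops over range(m), range(n)
  (PySem.List.pyRange 0 m).foldl (fun total_area i =>
    (PySem.List.pyRange 0 n).foldl (fun total_area j =>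
      let height := PySem.List.pyGetD (PySem.List.pyGetD grid i []) j 0
      let total_area := total_area +
        (if i = 0 then height
         else max 0 (height - PySem.List.pyGetD (PySem.List.pyGetD grid (i - 1) []) j 0))
      let total_area := total_area +
        (if i = m - 1 then height
         else max 0 (height - PySem.List.pyGetD (PySem.List.pyGetD grid (i + 1) []) j 0))
      let total_area := total_area +
        (if j = 0 then height
         else max 0 (height - PySem.List.pyGetD (PySem.List.pyGetD grid i []) (j - 1) 0))
      total_area +
        (if j = n - 1 then height
         else max 0 (height - PySem.List.pyGetD (PySem.List.pyGetD grid i []) (j + 1) 0))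
    ) total_area
  ) (0 + m * n)

-- ===== PORT B =====
-- sum(abs(a - b) for a, b in zip(row, row[1:]))
def pvAbsAdj (row : List Int) : Int := ((row.zip row.tail).map (fun p => |p.1 - p.2|)).sum
-- sum(abs(a - b) for a, b in zip(r1, r2))
def pvPairAbs (r1 r2 : List Int) : Int := ((r1.zip r2).map (fun p => |p.1 - p.2|)).sum

def calculate_painted_area_alt (m : Int) (n : Int) (grid : List (List Int)) : Int :=
  let total := m * n
  if m ≤ 0 ∨ n ≤ 0 then total
  else
    -- rows = [row[:n] for row in grid[:m]]
    let rows := (PySem.List.slice grid none (some m)).map (fun row => PySem.List.slice row none (some n))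
    -- rows[0] / rows[-1] / row[0] / row[-1] (total on the stated precondition, where they exist)
    let total := total + ((rows.headD []).sum + (rows.getLast?.getD []).sum)
    let total := rows.foldl (fun total row =>
      total + (row.headD 0 + row.getLast?.getD 0) + pvAbsAdj row) total
    (rows.zip rows.tail).foldl (fun total p => total + pvPairAbs p.1 p.2) total

-- ===== PRECONDITION & SPEC =====
-- Exactly the inputs on which A returns (no exception): when the grid is actually traversed
-- (m ≥ 1 and n ≥ 1) it must have at least m rows, each of length at least n; otherwise A
-- raises IndexError.
def Pre_calculate_painted_area (m : Int) (n : Int) (grid : List (List Int)) : Prop :=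
  m ≤ 0 ∨ n ≤ 0 ∨ (m ≤ grid.length ∧ ∀ r ∈ grid.take m.toNat, n ≤ r.length)
instance (m : Int) (n : Int) (grid : List (List Int)) : Decidable (Pre_calculate_painted_area m n grid) := by unfold Pre_calculate_painted_area; infer_instance

def pvWitness_calculate_painted_area : Int × Int × List (List Int) := (2, 2, [[1, 2], [3, 4]])

def Spec_calculate_painted_area (m : Int) (n : Int) (grid : List (List Int)) (out : Int) : Prop := out = calculate_painted_area_alt m n grid
instance (m : Int) (n : Int) (grid : List (List Int)) (out : Int) : Decidable (Spec_calculate_painted_area m n grid out) := by unfold Spec_calculate_painted_area; infer_instance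

-- ===== CLAIM (what is proved, stated in full; the proofs are below) =====
def Claim_equal_calculate_painted_area : Prop := ∀ (m : Int) (n : Int) (grid : List (List Int)), Dom_calculate_painted_area m n grid → Pre_calculate_painted_area m n grid → Spec_calculate_painted_area m n grid (calculate_painted_area m n grid)

-- ===== LEMMAS AND PROOFS =====

-- a fold that only ever adds g x to the accumulator
theorem pv_foldl_add_shape {α : Type} (l : List α) (f : Int → α → Int) (g : α → Int)
    (h : ∀ acc x, f acc x = acc + g x) : ∀ init : Int, l.foldl f init = init + (l.map g).sum := by
  induction l with
  | nil => intro init; simp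
  | cons x t ih => intro init; simp only [List.foldl_cons, List.map_cons, List.sum_cons, h, ih]; ring

-- a fold whose body fixes the accumulator on every element of l
theorem pv_foldl_fixed {α : Type} (l : List α) (f : Int → α → Int)
    (h : ∀ acc x, x ∈ l → f acc x = acc) : ∀ init : Int, l.foldl f init = init := by
  induction l with
  | nil => intro init; rfl
  | cons x t ih =>
      intro init
      rw [List.foldl_cons, h init x (by simp)]
      exact ih (fun acc x hx => h acc x (by simp [hx])) init

theorem pv_peel_first (N : Nat) (f g : Nat → Int) :
    ((List.range (N + 1)).map (fun j => if j = 0 then f j else g j)).sum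
      = f 0 + ((List.range N).map (fun k => g (k + 1))).sum := by
  rw [List.range_succ_eq_map]
  simp [List.map_map, Function.comp_def]

theorem pv_peel_last (N : Nat) (f g : Nat → Int) :
    ((List.range (N + 1)).map (fun j => if j = N then f j else g j)).sum
      = ((List.range N).map g).sum + f N := by
  rw [List.range_succ, List.map_append, List.sum_append]
  simp only [List.map_cons, List.map_nil, List.sum_cons, List.sum_nil, add_zero]
  congr 1
  apply congrArg
  apply List.map_congr_left
  intro k hk
  rw [if_neg (by simp at hk; omega)]

theorem pv_map_range_getD {α : Type} (l : List α) (d : α) :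
    (List.range l.length).map (fun i => l.getD i d) = l := by
  apply List.ext_getElem (by simp)
  intro i h1 h2
  simp [List.getD_eq_getElem?_getD, List.getElem?_eq_getElem h2]

theorem pv_map_range_getD_comp {α β : Type} (l : List α) (d : α) (h : α → β) :
    (List.range l.length).map (fun i => h (l.getD i d)) = l.map h := by
  have := congrArg (List.map h) (pv_map_range_getD l d)
  simpa [List.map_map, Function.comp_def] using this

theorem pv_range_zip_sum {α β : Type} (da : α) (db : β) (g : α → β → Int) :
    ∀ (a : List α) (b : List β), a.length = b.length →
    ((List.range a.length).map (fun j => g (a.getD j da) (b.getD j db))).sum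
      = ((a.zip b).map (fun p => g p.1 p.2)).sum := by
  intro a
  induction a with
  | nil => intro b hb; simp
  | cons x t ih =>
      intro b hb
      cases b with
      | nil => simp at hb
      | cons y s =>
          simp only [List.length_cons, List.range_succ_eq_map, List.map_cons, List.map_map,
            List.sum_cons, Function.comp_def, List.getD_cons_zero, List.getD_cons_succ,
            List.zip_cons_cons]
          have := ih s (by simpa using hb)
          omega

theorem pv_adj_zip_sum {α : Type} (d : α) (g : α → α → Int) :
    ∀ (r : List α),
    ((List.range (r.length - 1)).map (fun k => g (r.getD k d) (r.getD (k + 1) d))).sum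
      = ((r.zip r.tail).map (fun p => g p.1 p.2)).sum := by
  intro r
  induction r with
  | nil => simp
  | cons x t ih =>
      cases t with
      | nil => simp
      | cons y s =>
          simp only [List.length_cons, Nat.add_sub_cancel, List.range_succ_eq_map, List.map_cons,
            List.map_map, List.sum_cons, Function.comp_def, List.getD_cons_zero,
            List.getD_cons_succ, List.tail_cons, List.zip_cons_cons]
          have := ih
          simp only [List.length_cons, Nat.add_sub_cancel, List.tail_cons,
            List.getD_cons_succ] at this
          omega

theorem pv_max_sub_split (a b : Int) : max 0 (a - b) + max 0 (b - a) = |a - b| := by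
  rcases le_total a b with h | h
  · rw [max_eq_left (by omega), max_eq_right (by omega), abs_of_nonpos (by omega)]; ring
  · rw [max_eq_right (by omega), max_eq_left (by omega), abs_of_nonneg (by omega)]; ring

theorem pv_getD_last {α : Type} (r : List α) (d : α) :
    r.getD (r.length - 1) d = r.getLast?.getD d := by
  rw [List.getLast?_eq_getElem?, List.getD_eq_getElem?_getD]

-- the value of the grid cell (i, j) of the truncated row list R
def pvCell (R : List (List Int)) (i j : Nat) : Int := (R.getD i []).getD j 0

-- horizontal (left+right face) contribution of one row
theorem pv_hrow (r : List Int) (hr : 1 ≤ r.length) :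
    ((List.range r.length).map (fun j =>
      (if j = 0 then r.getD j 0 else max 0 (r.getD j 0 - r.getD (j - 1) 0)) +
      (if j = r.length - 1 then r.getD j 0 else max 0 (r.getD j 0 - r.getD (j + 1) 0)))).sum
      = r.headD 0 + r.getLast?.getD 0 + pvAbsAdj r := by
  obtain ⟨L, hL⟩ : ∃ L, r.length = L + 1 := ⟨r.length - 1, by omega⟩
  have hhead : r.getD 0 0 = r.headD 0 := by cases r <;> simp
  have hlast : r.getD L 0 = r.getLast?.getD 0 := by
    have h := pv_getD_last r 0
    rwa [hL, Nat.add_sub_cancel] at h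
  rw [hL]
  simp only [Nat.add_sub_cancel]
  rw [PySem.List.sum_map_add_int, pv_peel_first L, pv_peel_last L]
  have hmerge : ((List.range L).map (fun k => max 0 (r.getD (k + 1) 0 - r.getD (k + 1 - 1) 0))).sum
      + ((List.range L).map (fun k => max 0 (r.getD k 0 - r.getD (k + 1) 0))).sum
      = pvAbsAdj r := by
    rw [← PySem.List.sum_map_add_int]
    have hpt : ∀ k ∈ List.range L,
        max 0 (r.getD (k + 1) 0 - r.getD (k + 1 - 1) 0) + max 0 (r.getD k 0 - r.getD (k + 1) 0)
          = |r.getD k 0 - r.getD (k + 1) 0| := by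
      intro k _
      simp only [Nat.add_sub_cancel]
      rw [add_comm]
      exact pv_max_sub_split _ _
    rw [List.map_congr_left hpt]
    have h := pv_adj_zip_sum (0 : Int) (fun a b => |a - b|) r
    rw [hL, Nat.add_sub_cancel] at h
    rw [h]
    rfl
  omega

-- the main regrouping: A's per-cell four-face sum equals B's border + |difference| decomposition
theorem pv_grind (R : List (List Int)) (N : Nat) (hR : 1 ≤ R.length) (hN : 1 ≤ N)
    (hlen : ∀ r ∈ R, r.length = N) :
    ((List.range R.length).map (fun i => ((List.range N).map (fun j =>
      (if i = 0 then pvCell R i j else max 0 (pvCell R i j - pvCell R (i - 1) j)) +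
      ((if i = R.length - 1 then pvCell R i j else max 0 (pvCell R i j - pvCell R (i + 1) j)) +
      ((if j = 0 then pvCell R i j else max 0 (pvCell R i j - pvCell R i (j - 1))) +
      (if j = N - 1 then pvCell R i j else max 0 (pvCell R i j - pvCell R i (j + 1))))))).sum)).sum
      = (R.headD []).sum + (R.getLast?.getD []).sum
        + (R.map (fun r => r.headD 0 + r.getLast?.getD 0 + pvAbsAdj r)).sum
        + ((R.zip R.tail).map (fun p => pvPairAbs p.1 p.2)).sum := by
  simp only [pvCell]
  obtain ⟨M, hM⟩ : ∃ M, R.length = M + 1 := ⟨R.length - 1, by omega⟩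
  have hRne : R ≠ [] := List.ne_nil_of_length_pos (by omega)
  have hrowlen : ∀ i, i < R.length → (R.getD i []).length = N := by
    intro i hi
    refine hlen _ ?_
    rw [List.getD_eq_getElem _ _ hi]
    exact List.getElem_mem hi
  rw [hM]
  simp only [Nat.add_sub_cancel]
  have hinner : ∀ i ∈ List.range (M + 1),
      ((List.range N).map (fun j =>
        (if i = 0 then (R.getD i []).getD j 0
         else max 0 ((R.getD i []).getD j 0 - (R.getD (i - 1) []).getD j 0)) +
        ((if i = M then (R.getD i []).getD j 0
          else max 0 ((R.getD i []).getD j 0 - (R.getD (i + 1) []).getD j 0)) +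
         ((if j = 0 then (R.getD i []).getD j 0
           else max 0 ((R.getD i []).getD j 0 - (R.getD i []).getD (j - 1) 0)) +
          (if j = N - 1 then (R.getD i []).getD j 0
           else max 0 ((R.getD i []).getD j 0 - (R.getD i []).getD (j + 1) 0)))))).sum
      = (if i = 0 then ((List.range N).map (fun j => (R.getD i []).getD j 0)).sum
         else ((List.range N).map (fun j => max 0 ((R.getD i []).getD j 0 - (R.getD (i - 1) []).getD j 0))).sum)
        + ((if i = M then ((List.range N).map (fun j => (R.getD i []).getD j 0)).sum
            else ((List.range N).map (fun j => max 0 ((R.getD i []).getD j 0 - (R.getD (i + 1) []).getD j 0))).sum)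
           + ((R.getD i []).headD 0 + (R.getD i []).getLast?.getD 0 + pvAbsAdj (R.getD i []))) := by
    intro i hi
    rw [PySem.List.sum_map_add_int, PySem.List.sum_map_add_int]
    congr 1
    · by_cases h : i = 0 <;> simp [h]
    congr 1
    · by_cases h : i = M <;> simp [h]
    · have hr := hrowlen i (by simp at hi; omega)
      rw [← hr]
      exact pv_hrow _ (by rw [hr]; omega)
  rw [List.map_congr_left hinner, PySem.List.sum_map_add_int, PySem.List.sum_map_add_int]
  have h0len := hrowlen 0 (by omega)
  have hMlen := hrowlen M (by omega)
  have hhead : R.getD 0 [] = R.headD [] := by cases R <;> simp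
  have hlastR : R.getD M [] = R.getLast?.getD [] := by
    have h := pv_getD_last R []
    rw [hM, Nat.add_sub_cancel] at h
    exact h
  have hX : ((List.range (M + 1)).map (fun i =>
        if i = 0 then ((List.range N).map (fun j => (R.getD i []).getD j 0)).sum
        else ((List.range N).map (fun j => max 0 ((R.getD i []).getD j 0 - (R.getD (i - 1) []).getD j 0))).sum)).sum
      = (R.headD []).sum + ((List.range M).map (fun k =>
          (((R.getD k []).zip (R.getD (k + 1) [])).map (fun p => max 0 (p.2 - p.1))).sum)).sum := by
    rw [pv_peel_first M]
    congr 1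
    · rw [← h0len, pv_map_range_getD, hhead]
    · apply congrArg
      apply List.map_congr_left
      intro k hk
      simp only [Nat.add_sub_cancel]
      have hk' : k < M := by simpa using hk
      have ha := hrowlen k (by omega)
      have hb := hrowlen (k + 1) (by omega)
      rw [← ha]
      exact pv_range_zip_sum (0 : Int) (0 : Int) (fun x y => max 0 (y - x)) _ _ (by rw [ha, hb])
  have hY : ((List.range (M + 1)).map (fun i =>
        if i = M then ((List.range N).map (fun j => (R.getD i []).getD j 0)).sum
        else ((List.range N).map (fun j => max 0 ((R.getD i []).getD j 0 - (R.getD (i + 1) []).getD j 0))).sum)).sum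
      = ((List.range M).map (fun k =>
          (((R.getD k []).zip (R.getD (k + 1) [])).map (fun p => max 0 (p.1 - p.2))).sum)).sum
        + (R.getLast?.getD []).sum := by
    rw [pv_peel_last M]
    congr 1
    · apply congrArg
      apply List.map_congr_left
      intro k hk
      have hk' : k < M := by simpa using hk
      have ha := hrowlen k (by omega)
      have hb := hrowlen (k + 1) (by omega)
      rw [← ha]
      exact pv_range_zip_sum (0 : Int) (0 : Int) (fun x y => max 0 (x - y)) _ _ (by rw [ha, hb])
    · rw [← hMlen, pv_map_range_getD, hlastR]
  have hZ : ((List.range (M + 1)).map (fun i =>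
        (R.getD i []).headD 0 + (R.getD i []).getLast?.getD 0 + pvAbsAdj (R.getD i []))).sum
      = (R.map (fun r => r.headD 0 + r.getLast?.getD 0 + pvAbsAdj r)).sum := by
    have h := pv_map_range_getD_comp R [] (fun r => r.headD 0 + r.getLast?.getD 0 + pvAbsAdj r)
    rw [hM] at h
    exact congrArg List.sum h
  have hpair : ((List.range M).map (fun k =>
        (((R.getD k []).zip (R.getD (k + 1) [])).map (fun p => max 0 (p.2 - p.1))).sum)).sum
      + ((List.range M).map (fun k =>
        (((R.getD k []).zip (R.getD (k + 1) [])).map (fun p => max 0 (p.1 - p.2))).sum)).sum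
      = ((R.zip R.tail).map (fun p => pvPairAbs p.1 p.2)).sum := by
    rw [← PySem.List.sum_map_add_int]
    have hpt : ∀ k ∈ List.range M,
        (((R.getD k []).zip (R.getD (k + 1) [])).map (fun p => max 0 (p.2 - p.1))).sum
          + (((R.getD k []).zip (R.getD (k + 1) [])).map (fun p => max 0 (p.1 - p.2))).sum
          = pvPairAbs (R.getD k []) (R.getD (k + 1) []) := by
      intro k _
      rw [← PySem.List.sum_map_add_int]
      unfold pvPairAbs
      apply congrArg
      apply List.map_congr_left
      intro p _
      rw [add_comm]
      exact pv_max_sub_split _ _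
    rw [List.map_congr_left hpt]
    have h := pv_adj_zip_sum ([] : List Int) pvPairAbs R
    rw [hM, Nat.add_sub_cancel] at h
    exact h
  omega

-- the first m rows of the grid, truncated to their first n entries
def pvRows (m n : Int) (grid : List (List Int)) : List (List Int) :=
  (grid.take m.toNat).map (fun r => r.take n.toNat)

-- the four-face contribution of cell (i, j) in A, Int indices
def pvTermA (m n : Int) (grid : List (List Int)) (i j : Int) : Int :=
  let height := PySem.List.pyGetD (PySem.List.pyGetD grid i []) j 0
  (if i = 0 then height
   else max 0 (height - PySem.List.pyGetD (PySem.List.pyGetD grid (i - 1) []) j 0)) +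
  ((if i = m - 1 then height
    else max 0 (height - PySem.List.pyGetD (PySem.List.pyGetD grid (i + 1) []) j 0)) +
   ((if j = 0 then height
     else max 0 (height - PySem.List.pyGetD (PySem.List.pyGetD grid i []) (j - 1) 0)) +
    (if j = n - 1 then height
     else max 0 (height - PySem.List.pyGetD (PySem.List.pyGetD grid i []) (j + 1) 0))))

-- the same contribution, Nat indices into the truncated row list
def pvTermN (m n : Int) (grid : List (List Int)) (i j : Nat) : Int :=
  (if i = 0 then pvCell (pvRows m n grid) i j
   else max 0 (pvCell (pvRows m n grid) i j - pvCell (pvRows m n grid) (i - 1) j)) +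
  ((if i = (pvRows m n grid).length - 1 then pvCell (pvRows m n grid) i j
    else max 0 (pvCell (pvRows m n grid) i j - pvCell (pvRows m n grid) (i + 1) j)) +
   ((if j = 0 then pvCell (pvRows m n grid) i j
     else max 0 (pvCell (pvRows m n grid) i j - pvCell (pvRows m n grid) i (j - 1))) +
    (if j = n.toNat - 1 then pvCell (pvRows m n grid) i j
     else max 0 (pvCell (pvRows m n grid) i j - pvCell (pvRows m n grid) i (j + 1)))))

theorem pv_rows_length (m n : Int) (grid : List (List Int)) (hglen : m ≤ grid.length) :
    (pvRows m n grid).length = m.toNat := by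
  unfold pvRows
  simp [List.length_take]
  omega

theorem pv_A_foldl (m n : Int) (grid : List (List Int)) :
    calculate_painted_area m n grid
      = (0 + m * n) + ((PySem.List.pyRange 0 m).map (fun i =>
          ((PySem.List.pyRange 0 n).map (fun j => pvTermA m n grid i j)).sum)).sum := by
  unfold calculate_painted_area
  refine pv_foldl_add_shape _ _ _ ?_ _
  intro acc i
  refine pv_foldl_add_shape _ _ _ ?_ _
  intro acc' j
  simp only [pvTermA]
  ring

theorem pv_cell_eq (m n : Int) (grid : List (List Int)) (hglen : m ≤ grid.length)
    (hrlen : ∀ r ∈ grid.take m.toNat, n ≤ r.length) (k j : Nat)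
    (hk : k < m.toNat) (hj : j < n.toNat) :
    PySem.List.pyGetD (PySem.List.pyGetD grid (k : Int) []) (j : Int) 0
      = pvCell (pvRows m n grid) k j := by
  rw [PySem.List.pyGetD_natCast, PySem.List.pyGetD_natCast]
  have hkg : k < grid.length := by omega
  have hkt : k < (grid.take m.toNat).length := by simp [List.length_take]; omega
  have hmem : grid[k] ∈ grid.take m.toNat := by
    have : (grid.take m.toNat)[k] = grid[k] := List.getElem_take
    rw [← this]
    exact List.getElem_mem hkt
  have hjlen : j < grid[k].length := by
    have := hrlen grid[k] hmem
    omega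
  have hRk : (pvRows m n grid).getD k [] = (grid[k]).take n.toNat := by
    unfold pvRows
    rw [List.getD_eq_getElem _ _ (by simpa using hkt), List.getElem_map, List.getElem_take]
  unfold pvCell
  rw [hRk, List.getD_eq_getElem _ _ hkg,
    List.getD_eq_getElem _ _ hjlen,
    List.getD_eq_getElem _ _ (by simp [List.length_take]; omega : j < ((grid[k]).take n.toNat).length),
    List.getElem_take]

theorem pv_term_eq (m n : Int) (grid : List (List Int)) (hm : 1 ≤ m) (hn : 1 ≤ n)
    (hglen : m ≤ grid.length) (hrlen : ∀ r ∈ grid.take m.toNat, n ≤ r.length) (k j : Nat)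
    (hk : k < m.toNat) (hj : j < n.toNat) :
    pvTermA m n grid (k : Int) (j : Int) = pvTermN m n grid k j := by
  have hcell := pv_cell_eq m n grid hglen hrlen
  have hRlen := pv_rows_length m n grid hglen
  simp only [pvTermA, pvTermN, hRlen]
  congr 1
  · by_cases h0 : k = 0
    · subst h0
      rw [if_pos (by norm_num), if_pos rfl]
      exact hcell 0 j hk hj
    · rw [if_neg (by omega), if_neg h0,
        show ((k : Nat) : Int) - 1 = (((k - 1 : Nat)) : Int) by omega]
      rw [hcell k j hk hj, hcell (k - 1) j (by omega) hj]
  congr 1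
  · by_cases hM : k = m.toNat - 1
    · rw [if_pos (by omega), if_pos hM]
      exact hcell k j hk hj
    · rw [if_neg (by omega), if_neg hM,
        show ((k : Nat) : Int) + 1 = (((k + 1 : Nat)) : Int) by omega]
      rw [hcell k j hk hj, hcell (k + 1) j (by omega) hj]
  congr 1
  · by_cases h0 : j = 0
    · subst h0
      rw [if_pos (by norm_num), if_pos rfl]
      exact hcell k 0 hk hj
    · rw [if_neg (by omega), if_neg h0,
        show ((j : Nat) : Int) - 1 = (((j - 1 : Nat)) : Int) by omega]
      rw [hcell k j hk hj, hcell k (j - 1) hk (by omega)]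
  · by_cases hN : j = n.toNat - 1
    · rw [if_pos (by omega), if_pos hN]
      exact hcell k j hk hj
    · rw [if_neg (by omega), if_neg hN,
        show ((j : Nat) : Int) + 1 = (((j + 1 : Nat)) : Int) by omega]
      rw [hcell k j hk hj, hcell k (j + 1) hk (by omega)]

theorem pv_A_main (m n : Int) (grid : List (List Int)) (hm : 1 ≤ m) (hn : 1 ≤ n)
    (hglen : m ≤ grid.length) (hrlen : ∀ r ∈ grid.take m.toNat, n ≤ r.length) :
    calculate_painted_area m n grid
      = m * n + (((pvRows m n grid).headD []).sum + ((pvRows m n grid).getLast?.getD []).sum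
          + ((pvRows m n grid).map (fun r => r.headD 0 + r.getLast?.getD 0 + pvAbsAdj r)).sum
          + (((pvRows m n grid).zip (pvRows m n grid).tail).map (fun p => pvPairAbs p.1 p.2)).sum) := by
  have hRlen := pv_rows_length m n grid hglen
  have hlen' : ∀ r ∈ pvRows m n grid, r.length = n.toNat := by
    intro r hr
    unfold pvRows at hr
    obtain ⟨x, hx, rfl⟩ := List.mem_map.mp hr
    have := hrlen x hx
    simp [List.length_take]
    omega
  rw [pv_A_foldl]
  have hnat : ((PySem.List.pyRange 0 m).map (fun i =>
        ((PySem.List.pyRange 0 n).map (fun j => pvTermA m n grid i j)).sum)).sum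
      = ((List.range (pvRows m n grid).length).map (fun i =>
          ((List.range n.toNat).map (fun j => pvTermN m n grid i j)).sum)).sum := by
    rw [hRlen, PySem.List.pyRange_one 0 m, List.map_map]
    simp only [Function.comp_def, sub_zero, zero_add]
    apply congrArg
    apply List.map_congr_left
    intro k hk
    rw [PySem.List.pyRange_one 0 n, List.map_map]
    simp only [Function.comp_def, sub_zero, zero_add]
    apply congrArg
    apply List.map_congr_left
    intro j hj
    exact pv_term_eq m n grid hm hn hglen hrlen k j (by simpa using hk) (by simpa using hj)
  rw [hnat]
  have hgr := pv_grind (pvRows m n grid) n.toNat (by omega) (by omega) hlen'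
  simp only [pvTermN, pvCell] at *
  omega

theorem pv_B_main (m n : Int) (grid : List (List Int)) (hm : 1 ≤ m) (hn : 1 ≤ n) :
    calculate_painted_area_alt m n grid
      = m * n + (((pvRows m n grid).headD []).sum + ((pvRows m n grid).getLast?.getD []).sum
          + ((pvRows m n grid).map (fun r => r.headD 0 + r.getLast?.getD 0 + pvAbsAdj r)).sum
          + (((pvRows m n grid).zip (pvRows m n grid).tail).map (fun p => pvPairAbs p.1 p.2)).sum) := by
  unfold calculate_painted_area_alt
  dsimp only
  rw [if_neg (by omega)]
  have hslice : (PySem.List.slice grid none (some m)).map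
        (fun row => PySem.List.slice row none (some n)) = pvRows m n grid := by
    rw [PySem.List.slice_to grid (by omega)]
    unfold pvRows
    apply List.map_congr_left
    intro r _
    exact PySem.List.slice_to r (by omega)
  rw [hslice]
  rw [PySem.List.foldl_add]
  rw [pv_foldl_add_shape (pvRows m n grid)
    (fun total row => (total + (row.headD 0 + row.getLast?.getD 0)) + pvAbsAdj row)
    (fun row => (row.headD 0 + row.getLast?.getD 0) + pvAbsAdj row)
    (by intro acc x; ring) _]
  have hmap : (pvRows m n grid).map (fun row => (row.headD 0 + row.getLast?.getD 0) + pvAbsAdj row)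
      = (pvRows m n grid).map (fun r => r.headD 0 + r.getLast?.getD 0 + pvAbsAdj r) := rfl
  rw [hmap]
  ring

-- ===== VERDICT (by name: the statement is the Claim_ definition above) =====
theorem calculate_painted_area_spec : Claim_equal_calculate_painted_area := by
  intro m n grid _ hpre
  unfold Spec_calculate_painted_area
  by_cases hdeg : m ≤ 0 ∨ n ≤ 0
  · have hB : calculate_painted_area_alt m n grid = m * n := by
      unfold calculate_painted_area_alt
      dsimp only
      rw [if_pos hdeg]
    rw [hB]
    rcases hdeg with h | h
    · unfold calculate_painted_area
      rw [PySem.List.pyRange_one_eq_nil h]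
      dsimp only [List.foldl_nil]
      ring
    · unfold calculate_painted_area
      rw [pv_foldl_fixed _ _ (by
        intro acc x _
        rw [PySem.List.pyRange_one_eq_nil h]
        rfl) _]
      ring
  · have hmain : m ≤ grid.length ∧ ∀ r ∈ grid.take m.toNat, n ≤ r.length := by
      rcases hpre with h | h | h
      · exact absurd (Or.inl h) hdeg
      · exact absurd (Or.inr h) hdeg
      · exact h
    rw [pv_A_main m n grid (by omega) (by omega) hmain.1 hmain.2,
      pv_B_main m n grid (by omega) (by omega)]
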